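-- pv_equiv track=rewrite | github.com/JohnnyHowe/ucb-to-testflight | Editor/UploadToTestFlight/testflight_uploader/command_utility.py | pretty_command
-- ===== SOURCE A (Python) =====
-- def pretty_command(command: list, flag_separator:str="\t") -> str:
--     result = ""
--     for item in command:
--         is_flag = item.startswith("-")
--         if is_flag:
--             result += "\\\n" + flag_separator
--
--         quote_item = "\n" in result and not is_flag
--         if quote_item:
--             result += f"\"{item}\" "
--         else:
--             result += f"{item} "
--     return result
-- ===== SOURCE B (Python) =====
-- def pretty_command(command: list, flag_separator: str = "\t") -> str:
--     # Builds the parts in a list joined once at the end, and tracks whether a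
--     # newline has entered the output with a maintained boolean instead of
--     # rescanning the accumulated string each iteration.
--     parts = []
--     has_newline = False
--     for item in command:
--         is_flag = item.startswith("-")
--         if is_flag:
--             parts.append("\\\n" + flag_separator)
--             has_newline = True
--         if has_newline and not is_flag:
--             parts.append(f"\"{item}\" ")
--         else:
--             parts.append(f"{item} ")
--         if "\n" in item:
--             has_newline = True
--     return "".join(parts)
-- ===== Notes on version B (the rewrite author's own statement) =====
-- stated objective: faster
-- what changed: B joins a part list once at the end and maintains a running has_newline boolean instead of re-scanning the whole accumulated string ('\n' in result) and re-concatenating it on every iteration.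
import Mathlib
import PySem

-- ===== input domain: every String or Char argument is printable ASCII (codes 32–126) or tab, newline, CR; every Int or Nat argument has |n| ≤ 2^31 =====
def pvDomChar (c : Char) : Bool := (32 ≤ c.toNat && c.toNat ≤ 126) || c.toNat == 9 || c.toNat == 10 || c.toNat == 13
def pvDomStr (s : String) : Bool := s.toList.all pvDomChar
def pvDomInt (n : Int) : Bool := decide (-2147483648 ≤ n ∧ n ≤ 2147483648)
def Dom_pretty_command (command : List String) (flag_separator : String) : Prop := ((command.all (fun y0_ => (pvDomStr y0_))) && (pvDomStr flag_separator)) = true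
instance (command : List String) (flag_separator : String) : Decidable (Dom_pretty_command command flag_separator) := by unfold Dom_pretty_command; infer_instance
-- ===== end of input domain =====

-- B builds a part list joined once at the end and keeps a running has_newline boolean
-- instead of re-scanning and re-concatenating the whole accumulated string each iteration (objective: faster).

-- ===== PORT A =====
def pretty_command (command : List String) (flag_separator : String) : String :=
  command.foldl (fun result item =>
    let is_flag := PySem.Str.startswith item "-"
    let result := if is_flag then result ++ ("\\\n" ++ flag_separator) else result
    let quote_item := PySem.Str.isIn "\n" result && !is_flag
    if quote_item then result ++ ("\"" ++ item ++ "\" ")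
    else result ++ (item ++ " ")) ""

-- ===== PORT B =====
def pretty_command_alt (command : List String) (flag_separator : String) : String :=
  let st := command.foldl (fun (st : List String × Bool) item =>
    let is_flag := PySem.Str.startswith item "-"
    let st := if is_flag then (st.1 ++ ["\\\n" ++ flag_separator], true) else st
    let parts := if st.2 && !is_flag then st.1 ++ ["\"" ++ item ++ "\" "]
                 else st.1 ++ [item ++ " "]
    let hn := if PySem.Str.isIn "\n" item then true else st.2
    (parts, hn)) ([], false)
  PySem.Str.join "" st.1

-- ===== PRECONDITION & SPEC =====
def Spec_pretty_command (command : List String) (flag_separator : String) (out : String) : Prop := out = pretty_command_alt command flag_separator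
instance (command : List String) (flag_separator : String) (out : String) : Decidable (Spec_pretty_command command flag_separator out) := by unfold Spec_pretty_command; infer_instance

-- ===== CLAIM (what is proved, stated in full; the proofs are below) =====
def Claim_equal_pretty_command : Prop := ∀ (command : List String) (flag_separator : String), Dom_pretty_command command flag_separator → Spec_pretty_command command flag_separator (pretty_command command flag_separator)

-- ===== LEMMAS AND PROOFS =====

-- "".join(parts ++ [x]) = "".join(parts) ++ x
lemma intercalate_nil_sep (l : List (List Char)) : List.intercalate [] l = l.flatten := by
  induction l with
  | nil => rfl
  | cons a t ih =>
    cases t with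
    | nil => simp [List.intercalate]
    | cons b u => simp_all [List.intercalate, List.intersperse]

lemma join_append_singleton (parts : List String) (x : String) :
    PySem.Str.join "" (parts ++ [x]) = PySem.Str.join "" parts ++ x := by
  apply String.toList_injective
  simp [PySem.Str.join, PySem.Chars.join, intercalate_nil_sep]

-- '\n' in s, reduced to list membership of the newline character
lemma chars_isIn_nl (l : List Char) : PySem.Chars.isIn ['\n'] l = decide ('\n' ∈ l) := by
  rw [Bool.eq_iff_iff]
  simp [PySem.Chars.isIn_iff_infix, List.singleton_infix_iff]

lemma isIn_nl_append (a b : String) :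
    PySem.Str.isIn "\n" (a ++ b) = (PySem.Str.isIn "\n" a || PySem.Str.isIn "\n" b) := by
  simp [PySem.Str.isIn, show "\n".toList = ['\n'] from rfl, chars_isIn_nl]

lemma isIn_nl_flagpiece (sep : String) :
    PySem.Str.isIn "\n" ("\\\n" ++ sep) = true := by
  simp [PySem.Str.isIn, show "\n".toList = ['\n'] from rfl, chars_isIn_nl,
        show ("\\\n" ++ sep).toList = '\\' :: '\n' :: sep.toList from by simp]

lemma isIn_nl_quoted (item : String) :
    PySem.Str.isIn "\n" ("\"" ++ item ++ "\" ") = (PySem.Str.isIn "\n" item) := by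
  simp [PySem.Str.isIn, show "\n".toList = ['\n'] from rfl, chars_isIn_nl]

lemma isIn_nl_space (item : String) :
    PySem.Str.isIn "\n" (item ++ " ") = (PySem.Str.isIn "\n" item) := by
  simp [PySem.Str.isIn, show "\n".toList = ['\n'] from rfl, chars_isIn_nl]

-- loop invariant: A's accumulated string is the join of B's parts, and B's flag
-- records exactly whether that string contains a newline
lemma loop_eq (sep : String) (cmd : List String) :
    ∀ (r : String) (parts : List String) (hn : Bool),
    r = PySem.Str.join "" parts → PySem.Str.isIn "\n" r = hn →
    cmd.foldl (fun result item =>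
      let is_flag := PySem.Str.startswith item "-"
      let result := if is_flag then result ++ ("\\\n" ++ sep) else result
      let quote_item := PySem.Str.isIn "\n" result && !is_flag
      if quote_item then result ++ ("\"" ++ item ++ "\" ")
      else result ++ (item ++ " ")) r
    = PySem.Str.join "" (cmd.foldl (fun (st : List String × Bool) item =>
      let is_flag := PySem.Str.startswith item "-"
      let st := if is_flag then (st.1 ++ ["\\\n" ++ sep], true) else st
      let parts := if st.2 && !is_flag then st.1 ++ ["\"" ++ item ++ "\" "]
                   else st.1 ++ [item ++ " "]
      let hn := if PySem.Str.isIn "\n" item then true else st.2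
      (parts, hn)) (parts, hn)).1 := by
  induction cmd with
  | nil => intro r parts hn h1 _; simpa using h1
  | cons item rest ih =>
    intro r parts hn h1 h2
    simp only [List.foldl_cons]
    by_cases hf : PySem.Str.startswith item "-" = true
    · -- flag item: prefix appended, never quoted
      simp only [hf, if_pos, Bool.not_true, Bool.and_false, if_neg (by simp : ¬ (false = true))]
      apply ih
      · rw [join_append_singleton, join_append_singleton, h1]
      · rw [isIn_nl_append, isIn_nl_append, isIn_nl_flagpiece]
        cases h : PySem.Str.isIn "\n" item <;> simp
    · simp only [Bool.not_eq_true] at hf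
      simp only [hf, Bool.not_false, Bool.and_true, if_neg (by simp : ¬ (false = true)), h2]
      by_cases hq : hn = true
      · simp only [hq, if_pos]
        apply ih
        · rw [join_append_singleton, h1]
        · rw [isIn_nl_append, h2, hq, isIn_nl_quoted]
          cases h : PySem.Str.isIn "\n" item <;> simp
      · simp only [Bool.not_eq_true] at hq
        simp only [hq, if_neg (by simp : ¬ (false = true))]
        apply ih
        · rw [join_append_singleton, h1]
        · rw [isIn_nl_append, h2, hq, isIn_nl_space]
          cases h : PySem.Str.isIn "\n" item <;> simp

-- ===== VERDICT (by name: the statement is the Claim_ definition above) =====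
theorem pretty_command_spec : Claim_equal_pretty_command := by
  intro command flag_separator _
  unfold Spec_pretty_command pretty_command pretty_command_alt
  exact loop_eq flag_separator command "" [] false rfl rfl
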